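-- pv_equiv track=rewrite | github.com/ShriK1912/MarketAI-Pro | services/template_builder.py | _parse_platform_examples
-- ===== SOURCE A (Python) =====
-- def _parse_platform_examples(text: str) -> dict[str, list[str]]:
--     examples = {"linkedin": [], "twitter": [], "instagram": []}
--     current_platform = None
--     buffer: list[str] = []
--     for raw_line in text.splitlines():
--         line = raw_line.strip()
--         lowered = line.rstrip(":").lower()
--         if lowered in examples:
--             if current_platform and buffer:
--                 examples[current_platform] = ["\n".join(buffer).strip()]
--             current_platform = lowered
--             buffer = []
--             continue
--         if current_platform is not None and line:
--             buffer.append(line)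
--     if current_platform and buffer:
--         examples[current_platform] = ["\n".join(buffer).strip()]
--     return examples
-- ===== SOURCE B (Python) =====
-- def _parse_platform_examples(text: str) -> dict[str, list[str]]:
--     keys = ("linkedin", "twitter", "instagram")
--     # pass 1: cut the text into (platform, block) segments, dropping pre-header lines
--     segments: list[tuple[str, list[str]]] = []
--     for raw in text.splitlines():
--         line = raw.strip()
--         tag = line.rstrip(":").lower()
--         if tag in keys:
--             segments.append((tag, []))
--         elif segments and line:
--             segments[-1][1].append(line)
--     # pass 2: later segments overwrite earlier ones; empty blocks leave [] untouched
--     examples: dict[str, list[str]] = {k: [] for k in keys}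
--     for tag, block in segments:
--         if block:
--             examples[tag] = ["\n".join(block).strip()]
--     return examples
-- ===== Notes on version B (the rewrite author's own statement) =====
-- stated objective: alternative
-- what changed: Replaces A's single stateful scan (current platform + pending buffer flushed at each header and at EOF) by a two-pass decomposition: first cut the text into (platform, block) segments, then fill the result dict from the segment list with last-wins overwrites.
import Mathlib
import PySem

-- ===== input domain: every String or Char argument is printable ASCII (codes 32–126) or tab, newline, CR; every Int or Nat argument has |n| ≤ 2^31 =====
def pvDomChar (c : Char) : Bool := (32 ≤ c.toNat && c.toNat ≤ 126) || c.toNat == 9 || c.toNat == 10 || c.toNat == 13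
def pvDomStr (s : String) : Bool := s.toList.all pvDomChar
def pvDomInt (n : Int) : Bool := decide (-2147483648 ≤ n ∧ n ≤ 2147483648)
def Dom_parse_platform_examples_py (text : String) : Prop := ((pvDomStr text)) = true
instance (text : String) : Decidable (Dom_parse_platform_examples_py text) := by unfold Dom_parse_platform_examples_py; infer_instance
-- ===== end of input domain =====

-- B replaces A's single stateful scan by a two-pass decomposition (segment list, then fill); alternative, same cost.


-- shared helper: exact port of Python's line.rstrip(":") (drop trailing ':' characters)
def pvRstripColons (s : String) : String := String.ofList ((s.toList.reverse.dropWhile (fun c => c == ':')).reverse)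

-- ===== PORT A =====
-- A's initial dict literal
def pvAInit : PySem.Dict String (List String) :=
  PySem.Dict.mk [("linkedin", []), ("twitter", []), ("instagram", [])]

-- A's for-loop over the lines, state = (examples, current_platform, buffer); the [] case is the final flush after the loop
def pvALoop : List String → PySem.Dict String (List String) → Option String → List String → PySem.Dict String (List String)
  | [], examples, current, buffer =>
      -- if current_platform and buffer: examples[current_platform] = ["\n".join(buffer).strip()]
      match current with
      | some cp => if buffer.isEmpty then examples else examples.insert cp [PySem.Str.strip (PySem.Str.join "\n" buffer)]
      | none => examples
  | raw_line :: rest, examples, current, buffer =>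
      let line := PySem.Str.strip raw_line
      let lowered := PySem.Str.lower (pvRstripColons line)
      if examples.contains lowered then
        match current with
        | some cp =>
            if buffer.isEmpty then pvALoop rest examples (some lowered) []
            else pvALoop rest (examples.insert cp [PySem.Str.strip (PySem.Str.join "\n" buffer)]) (some lowered) []
        | none => pvALoop rest examples (some lowered) []
      else if current.isSome && !(line == "") then pvALoop rest examples current (buffer ++ [line])
      else pvALoop rest examples current buffer

def parse_platform_examples_py (text : String) : List (String × List String) :=
  (pvALoop (PySem.Str.splitlines text) pvAInit none []).items

-- ===== PORT B =====
def pvKeys : List String := ["linkedin", "twitter", "instagram"]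

-- pass 1 of Source B; the accumulator holds the segment list in REVERSE so that 'segments[-1][1].append(line)' is a head update
def pvBSegs : List String → List (String × List String) → List (String × List String)
  | [], revSegs => revSegs
  | raw :: rest, revSegs =>
      let line := PySem.Str.strip raw
      let tag := PySem.Str.lower (pvRstripColons line)
      if pvKeys.contains tag then pvBSegs rest ((tag, []) :: revSegs)
      else
        match revSegs with
        | (t, b) :: tl => if line == "" then pvBSegs rest ((t, b) :: tl) else pvBSegs rest ((t, b ++ [line]) :: tl)
        | [] => pvBSegs rest []

-- pass 2 of Source B: fill the dict from the segment list
def pvBFill (d : PySem.Dict String (List String)) (segs : List (String × List String)) : PySem.Dict String (List String) :=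
  segs.foldl (fun d p => if p.2.isEmpty then d else d.insert p.1 [PySem.Str.strip (PySem.Str.join "\n" p.2)]) d

def parse_platform_examples_py_alt (text : String) : List (String × List String) :=
  (pvBFill (PySem.Dict.mk (pvKeys.map (fun k => (k, ([] : List String))))) ((pvBSegs (PySem.Str.splitlines text) []).reverse)).items

-- ===== PRECONDITION & SPEC =====
def Spec_parse_platform_examples_py (text : String) (out : List (String × List String)) : Prop := out = parse_platform_examples_py_alt text
instance (text : String) (out : List (String × List String)) : Decidable (Spec_parse_platform_examples_py text out) := by unfold Spec_parse_platform_examples_py; infer_instance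

-- ===== CLAIM (what is proved, stated in full; the proofs are below) =====
def Claim_equal_parse_platform_examples_py : Prop := ∀ (text : String), Dom_parse_platform_examples_py text → Spec_parse_platform_examples_py text (parse_platform_examples_py text)

-- ===== LEMMAS AND PROOFS =====

-- B's initial dict is A's initial dict
theorem pvInit_eq : PySem.Dict.mk (pvKeys.map (fun k => (k, ([] : List String)))) = pvAInit := by decide

-- the relation between A's loop state and B's reversed segment list
def pvInv (examples : PySem.Dict String (List String)) (current : Option String) (buffer : List String)
    (revSegs : List (String × List String)) : Prop :=
  (∀ p ∈ revSegs, pvKeys.contains p.1 = true) ∧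
  match current, revSegs with
  | none, [] => examples = pvAInit ∧ buffer = []
  | some cp, (t, b) :: rest => cp = t ∧ buffer = b ∧ examples = pvBFill pvAInit rest.reverse
  | _, _ => False

theorem pvBFill_append (d : PySem.Dict String (List String)) (l : List (String × List String)) (p : String × List String) :
    pvBFill d (l ++ [p]) = (if p.2.isEmpty then pvBFill d l else (pvBFill d l).insert p.1 [PySem.Str.strip (PySem.Str.join "\n" p.2)]) := by
  simp [pvBFill, List.foldl_append]

theorem pvContains_pvBFill (x : String) (l : List (String × List String)) :
    ∀ (d : PySem.Dict String (List String)), (∀ p ∈ l, d.contains p.1 = true) → (pvBFill d l).contains x = d.contains x := by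
  induction l with
  | nil => intro d _; rfl
  | cons p tl ih =>
      intro d h
      have hp := h p (List.mem_cons_self ..)
      have htl : ∀ q ∈ tl, d.contains q.1 = true := fun q hq => h q (List.mem_cons_of_mem _ hq)
      simp only [pvBFill, List.foldl_cons]
      split
      · exact ih d htl
      · have htl' : ∀ q ∈ tl, (d.insert p.1 [PySem.Str.strip (PySem.Str.join "\n" p.2)]).contains q.1 = true := by
          intro q hq
          rw [PySem.Dict.contains_insert]
          simp [htl q hq]
        rw [show (List.foldl (fun d p => if p.2.isEmpty = true then d else d.insert p.1 [PySem.Str.strip (PySem.Str.join "\n" p.2)]) (d.insert p.1 [PySem.Str.strip (PySem.Str.join "\n" p.2)]) tl) = pvBFill (d.insert p.1 [PySem.Str.strip (PySem.Str.join "\n" p.2)]) tl from rfl,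
            ih _ htl', PySem.Dict.contains_insert]
        by_cases hx : x = p.1
        · simp [hx, hp]
        · simp [hx]

theorem pvAInit_contains (x : String) : pvAInit.contains x = pvKeys.contains x := by
  simp [pvAInit, pvKeys, beq_eq_decide, eq_comm]

-- main invariant lemma: A's loop from a related state computes pass 2 of B over pass 1's output
theorem pvLoop_eq (lines : List String) :
    ∀ (examples : PySem.Dict String (List String)) (current : Option String) (buffer : List String)
      (revSegs : List (String × List String)), pvInv examples current buffer revSegs →
      pvALoop lines examples current buffer = pvBFill pvAInit ((pvBSegs lines revSegs).reverse) := by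
  induction lines with
  | nil =>
      intro examples current buffer revSegs hinv
      obtain ⟨hkeys, hrel⟩ := hinv
      match current, revSegs with
      | none, [] =>
          obtain ⟨he, hb⟩ := hrel
          rw [he]; rfl
      | some cp, (t, b) :: rst =>
          obtain ⟨hcp, hb, he⟩ := hrel
          subst hcp; subst hb; subst he
          show _ = pvBFill pvAInit (((cp, buffer) :: rst).reverse)
          rw [List.reverse_cons, pvBFill_append]
          rfl
      | none, _ :: _ => exact absurd hrel (by simp)
      | some _, [] => exact absurd hrel (by simp)
  | cons raw rest ih =>
      intro examples current buffer revSegs hinv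
      obtain ⟨hkeys, hrel⟩ := hinv
      simp only [pvALoop, pvBSegs]
      set line := PySem.Str.strip raw with hline
      set lowered := PySem.Str.lower (pvRstripColons line) with hlow
      have hcontains : examples.contains lowered = pvKeys.contains lowered := by
        match current, revSegs with
        | none, [] =>
            obtain ⟨he, _⟩ := hrel; rw [he, pvAInit_contains]
        | some cp, (t, b) :: rst =>
            obtain ⟨_, _, he⟩ := hrel
            rw [he, pvContains_pvBFill lowered _ _ (by
              intro q hq
              rw [pvAInit_contains]
              exact hkeys q (List.mem_cons_of_mem _ (by simpa using hq))), pvAInit_contains]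
        | none, _ :: _ => exact absurd hrel (by simp)
        | some _, [] => exact absurd hrel (by simp)
      by_cases hmem : pvKeys.contains lowered = true
      · rw [if_pos (by rw [hcontains]; exact hmem), if_pos hmem]
        match current, revSegs with
        | none, [] =>
            obtain ⟨he, hb⟩ := hrel
            exact ih examples (some lowered) [] [(lowered, [])]
              ⟨by simpa using hmem, rfl, rfl, by simp [pvBFill, he]⟩
        | some cp, (t, b) :: rst =>
            obtain ⟨hcp, hb, he⟩ := hrel
            have hkeys' : ∀ q ∈ (lowered, ([] : List String)) :: (t, b) :: rst, pvKeys.contains q.1 = true := by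
              intro q hq
              rcases List.mem_cons.mp hq with h | h
              · subst h; simpa using hmem
              · exact hkeys q h
            by_cases hbe : buffer.isEmpty = true
            · simp only [hbe, reduceIte]
              refine ih _ (some lowered) [] ((lowered, []) :: (t, b) :: rst) ⟨hkeys', rfl, rfl, ?_⟩
              rw [List.reverse_cons, pvBFill_append]
              have hb' : b.isEmpty = true := by rw [← hb]; exact hbe
              simp [hb', he]
            · have hbe' : buffer.isEmpty = false := by simpa using hbe
              simp only [hbe', Bool.false_eq_true, if_false]
              refine ih _ (some lowered) [] ((lowered, []) :: (t, b) :: rst) ⟨hkeys', rfl, rfl, ?_⟩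
              rw [List.reverse_cons, pvBFill_append]
              have hb' : ¬ b.isEmpty = true := by rw [← hb]; exact hbe
              simp [hb', he, hcp, hb]
        | none, _ :: _ => exact absurd hrel (by simp)
        | some _, [] => exact absurd hrel (by simp)
      · rw [if_neg (by rw [hcontains]; exact hmem), if_neg hmem]
        match current, revSegs with
        | none, [] =>
            obtain ⟨he, hb⟩ := hrel
            simp only [Option.isSome_none, Bool.false_and, Bool.false_eq_true, if_false]
            exact ih examples none buffer [] ⟨hkeys, he, hb⟩
        | some cp, (t, b) :: rst =>
            obtain ⟨hcp, hb, he⟩ := hrel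
            by_cases hle : (line == "") = true
            · simp only [hle, Option.isSome_some, Bool.not_true, Bool.and_false,
                Bool.false_eq_true, if_false, reduceIte]
              exact ih examples (some cp) buffer ((t, b) :: rst) ⟨hkeys, hcp, hb, he⟩
            · have hle' : (line == "") = false := by simpa using hle
              simp only [hle', Option.isSome_some, Bool.not_false, Bool.and_true,
                Bool.false_eq_true, if_false, reduceIte]
              refine ih examples (some cp) (buffer ++ [line]) ((t, b ++ [line]) :: rst) ⟨?_, hcp, by rw [hb], he⟩
              intro q hq
              rcases List.mem_cons.mp hq with h | h
              · subst h; exact hkeys (t, b) (List.mem_cons_self ..)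
              · exact hkeys q (List.mem_cons_of_mem _ h)
        | none, _ :: _ => exact absurd hrel (by simp)
        | some _, [] => exact absurd hrel (by simp)

-- ===== VERDICT (by name: the statement is the Claim_ definition above) =====
theorem parse_platform_examples_py_spec : Claim_equal_parse_platform_examples_py := by
  intro text _
  unfold Spec_parse_platform_examples_py parse_platform_examples_py parse_platform_examples_py_alt
  rw [pvInit_eq, pvLoop_eq (PySem.Str.splitlines text) pvAInit none [] [] ⟨by simp, rfl, rfl⟩]
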